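-- pv_equiv track=rewrite | github.com/GeeTransit/Form | form.py | order_keys
-- ===== SOURCE A (Python) =====
-- def order_keys(raw_keys, types):
--     # Order: other, time, date, radio/checkbox
--     others, times, dates, choices = [], [], [], []
--     for index, type in enumerate(types):
--         if type == "time":
--             times.append(index)
--         elif type == "date":
--             dates.append(index)
--         elif type == "choice":
--             choices.append(index)
--         else:
--             others.append(index)
--     indices = [*others, *times, *dates, *choices]
--     assert len(indices) == len(types)
--     keys = [None] * len(types)
--     for index, raw_key in zip(indices, raw_keys):
--         keys[index] = raw_key
--     return keys
-- ===== SOURCE B (Python) =====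
-- # Counting-sort style: compute each key's target rank directly (group offset +
-- # within-group count) in one pass, instead of building index buckets and scattering.
-- def _prio(t):
--     if t == "time":
--         return 1
--     if t == "date":
--         return 2
--     if t == "choice":
--         return 3
--     return 0
--
-- def order_keys(raw_keys, types):
--     p = [_prio(t) for t in types]
--     counts = [0, 0, 0, 0]
--     for x in p:
--         counts[x] = counts[x] + 1
--     offs = [0, counts[0], counts[0] + counts[1], counts[0] + counts[1] + counts[2]]
--     nxt = [offs[0], offs[1], offs[2], offs[3]]
--     out = []
--     for x in p:
--         out.append(raw_keys[nxt[x]])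
--         nxt[x] = nxt[x] + 1
--     return out
-- ===== Notes on version B (the rewrite author's own statement) =====
-- stated objective: alternative
-- what changed: Replaces A's bucket-building of index lists plus scatter into a None-filled array by a counting-sort style single pass that computes each key's target rank (group offset + running within-group count) directly and appends to the output.
-- outside the precondition, e.g. on order_keys(['a'], ['time', 'date']): A returns ['a', None], B raises IndexError
import Mathlib
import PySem

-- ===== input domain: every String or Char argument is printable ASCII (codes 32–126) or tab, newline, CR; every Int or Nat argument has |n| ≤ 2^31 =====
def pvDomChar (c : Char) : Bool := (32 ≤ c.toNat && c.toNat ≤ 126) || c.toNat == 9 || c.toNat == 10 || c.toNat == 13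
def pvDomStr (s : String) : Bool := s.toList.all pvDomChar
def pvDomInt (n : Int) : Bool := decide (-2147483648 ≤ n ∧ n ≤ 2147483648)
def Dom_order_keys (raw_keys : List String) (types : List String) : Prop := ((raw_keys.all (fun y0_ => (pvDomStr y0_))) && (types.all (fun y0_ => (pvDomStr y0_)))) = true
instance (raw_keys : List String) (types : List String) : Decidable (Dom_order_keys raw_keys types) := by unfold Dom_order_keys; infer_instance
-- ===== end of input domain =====

-- B replaces A's four index buckets + scatter with a counting-sort style single pass
-- computing each key's target rank directly (objective: alternative, same O(n) cost).

-- ===== PORT A =====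
-- Python's `[None]*len(types)` is modelled as `replicate _ ""`; under Pre_ every slot
-- is overwritten before the list is returned, so the placeholder never survives.
def order_keys (raw_keys : List String) (types : List String) : List String :=
  let grp := ((List.range types.length).zip types).foldl
    (fun (s : List Nat × List Nat × List Nat × List Nat) it =>
      if it.2 = "time" then (s.1, s.2.1 ++ [it.1], s.2.2.1, s.2.2.2)
      else if it.2 = "date" then (s.1, s.2.1, s.2.2.1 ++ [it.1], s.2.2.2)
      else if it.2 = "choice" then (s.1, s.2.1, s.2.2.1, s.2.2.2 ++ [it.1])
      else (s.1 ++ [it.1], s.2.1, s.2.2.1, s.2.2.2)) ([], [], [], [])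
  let indices := grp.1 ++ grp.2.1 ++ grp.2.2.1 ++ grp.2.2.2
  (indices.zip raw_keys).foldl (fun ks iv => ks.set iv.1 iv.2) (List.replicate types.length "")

-- ===== PORT B =====
def prioB (t : String) : Nat :=
  if t = "time" then 1
  else if t = "date" then 2
  else if t = "choice" then 3
  else 0

-- Python's `raw_keys[nxt[x]]` raises IndexError out of range; `getD _ ""` is exact
-- under Pre_, where the index is always in range.
def order_keys_alt (raw_keys : List String) (types : List String) : List String :=
  let p := types.map prioB
  let counts := p.foldl (fun c x => c.set x (c.getD x 0 + 1)) [0, 0, 0, 0]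
  let offs : List Nat := [0, counts.getD 0 0, counts.getD 0 0 + counts.getD 1 0,
    counts.getD 0 0 + counts.getD 1 0 + counts.getD 2 0]
  let res := p.foldl (fun (s : List Nat × List String) x =>
      (s.1.set x (s.1.getD x 0 + 1), s.2 ++ [raw_keys.getD (s.1.getD x 0) ""]))
    ([offs.getD 0 0, offs.getD 1 0, offs.getD 2 0, offs.getD 3 0], [])
  res.2

-- ===== PRECONDITION & SPEC =====
-- Pre_ excludes inputs with fewer raw_keys than types: there Python A returns a list
-- still containing None, which is not a value of the declared List String type
-- (and B raises IndexError).
def Pre_order_keys (raw_keys : List String) (types : List String) : Prop :=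
  types.length ≤ raw_keys.length
instance (raw_keys : List String) (types : List String) : Decidable (Pre_order_keys raw_keys types) := by unfold Pre_order_keys; infer_instance

def pvWitness_order_keys : List String × List String := (["a", "b", "c"], ["time", "x", "date"])

def Spec_order_keys (raw_keys : List String) (types : List String) (out : List String) : Prop := out = order_keys_alt raw_keys types
instance (raw_keys : List String) (types : List String) (out : List String) : Decidable (Spec_order_keys raw_keys types out) := by unfold Spec_order_keys; infer_instance

-- ===== CLAIM (what is proved, stated in full; the proofs are below) =====
def Claim_equal_order_keys : Prop := ∀ (raw_keys : List String) (types : List String), Dom_order_keys raw_keys types → Pre_order_keys raw_keys types → Spec_order_keys raw_keys types (order_keys raw_keys types)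

-- ===== LEMMAS AND PROOFS =====

-- positions (starting from offset k) at which the priority list has value v
def posFrom (v : Nat) : Nat → List Nat → List Nat
  | _, [] => []
  | k, x :: xs => if x = v then k :: posFrom v (k + 1) xs else posFrom v (k + 1) xs

lemma prioB_lt4 (t : String) : prioB t < 4 := by
  unfold prioB; split_ifs <;> omega

lemma getD_set {α : Type} (l : List α) (i j : Nat) (a d : α) :
    (l.set i a).getD j d = if i = j ∧ j < l.length then a else l.getD j d := by
  rw [List.getD_eq_getElem?_getD, List.getD_eq_getElem?_getD, List.getElem?_set]
  by_cases h : i = j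
  · subst h
    by_cases h2 : i < l.length
    · simp [h2]
    · have hn : l[i]? = none := List.getElem?_eq_none_iff.mpr (by omega)
      simp [h2, hn]
  · simp [h]

lemma posFrom_length (v : Nat) : ∀ (p : List Nat) (k : Nat), (posFrom v k p).length = p.count v := by
  intro p
  induction p with
  | nil => intro k; simp [posFrom]
  | cons x xs ih =>
    intro k
    by_cases h : x = v <;> simp [posFrom, h, ih, List.count_cons]

lemma posFrom_getElem? (v : Nat) : ∀ (p : List Nat) (k i : Nat), i < p.length → p.getD i 0 = v →
    (posFrom v k p)[(p.take i).count v]? = some (k + i) := by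
  intro p
  induction p with
  | nil => intro k i hi; simp at hi
  | cons x xs ih =>
    intro k i hi hv
    cases i with
    | zero =>
      simp at hv
      simp [posFrom, hv]
    | succ i =>
      simp at hi
      have hxs : xs.getD i 0 = v := hv
      by_cases h : x = v
      · have hpf : posFrom v k (x :: xs) = k :: posFrom v (k + 1) xs := by
          simp [posFrom, h]
        have hc : ((x :: xs).take (i + 1)).count v = (xs.take i).count v + 1 := by
          simp [List.count_cons, h]
        rw [hpf, hc, List.getElem?_cons_succ, show k + (i + 1) = (k + 1) + i by omega]
        exact ih (k + 1) i hi hxs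
      · have hpf : posFrom v k (x :: xs) = posFrom v (k + 1) xs := by
          simp [posFrom, h]
        have hc : ((x :: xs).take (i + 1)).count v = (xs.take i).count v := by
          simp [List.count_cons, h]
        rw [hpf, hc, show k + (i + 1) = (k + 1) + i by omega]
        exact ih (k + 1) i hi hxs

lemma posFrom_mem (v : Nat) : ∀ (p : List Nat) (k j : Nat), j ∈ posFrom v k p →
    k ≤ j ∧ j - k < p.length ∧ p.getD (j - k) (v + 1) = v := by
  intro p
  induction p with
  | nil => intro k j h; simp [posFrom] at h
  | cons x xs ih =>
    intro k j h
    by_cases hx : x = v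
    · simp [posFrom, hx] at h
      rcases h with h | h
      · subst h; simp [hx]
      · obtain ⟨h1, h2, h3⟩ := ih (k + 1) j h
        refine ⟨by omega, by simp; omega, ?_⟩
        have : j - k = (j - (k + 1)) + 1 := by omega
        rw [this]; simpa using h3
    · simp [posFrom, hx] at h
      obtain ⟨h1, h2, h3⟩ := ih (k + 1) j h
      refine ⟨by omega, by simp; omega, ?_⟩
      have hjk : j - k = (j - (k + 1)) + 1 := by omega
      rw [hjk]; simpa using h3

lemma posFrom_pairwise (v : Nat) : ∀ (p : List Nat) (k : Nat), (posFrom v k p).Pairwise (· < ·) := by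
  intro p
  induction p with
  | nil => intro k; simp [posFrom]
  | cons x xs ih =>
    intro k
    by_cases hx : x = v <;> simp [posFrom, hx]
    · refine ⟨fun j hj => ?_, ih (k + 1)⟩
      have := (posFrom_mem v xs (k + 1) j hj).1
      omega
    · exact ih (k + 1)

lemma count4 : ∀ (p : List Nat), (∀ x ∈ p, x < 4) →
    p.count 0 + p.count 1 + p.count 2 + p.count 3 = p.length := by
  intro p
  induction p with
  | nil => intro _; simp
  | cons x xs ih =>
    intro h
    have hx : x < 4 := h x (by simp)
    have := ih (fun y hy => h y (by simp [hy]))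
    interval_cases x <;> simp [List.count_cons] <;> omega

-- A's scatter fold
lemma scatter_length : ∀ (pairs : List (Nat × String)) (acc : List String),
    (pairs.foldl (fun ks iv => ks.set iv.1 iv.2) acc).length = acc.length := by
  intro pairs
  induction pairs with
  | nil => intro acc; rfl
  | cons pr rest ih => intro acc; simp [List.foldl_cons, ih]

lemma scatter_getD_notmem : ∀ (pairs : List (Nat × String)) (acc : List String) (q : Nat),
    (∀ pr ∈ pairs, pr.1 ≠ q) →
    (pairs.foldl (fun ks iv => ks.set iv.1 iv.2) acc).getD q "" = acc.getD q "" := by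
  intro pairs
  induction pairs with
  | nil => intro acc q _; rfl
  | cons pr rest ih =>
    intro acc q h
    simp only [List.foldl_cons]
    rw [ih _ q (fun x hx => h x (by simp [hx]))]
    rw [getD_set]
    have : pr.1 ≠ q := h pr (by simp)
    simp [this]

lemma scatter_getD : ∀ (pairs : List (Nat × String)) (acc : List String) (k : Nat)
    (hk : k < pairs.length), (pairs.map Prod.fst).Nodup → pairs[k].1 < acc.length →
    (pairs.foldl (fun ks iv => ks.set iv.1 iv.2) acc).getD pairs[k].1 "" = pairs[k].2 := by
  intro pairs
  induction pairs with
  | nil => intro acc k hk; simp at hk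
  | cons pr rest ih =>
    intro acc k hk hnd hlt
    simp only [List.map_cons, List.nodup_cons] at hnd
    cases k with
    | zero =>
      simp only [List.getElem_cons_zero] at hlt ⊢
      simp only [List.foldl_cons]
      rw [scatter_getD_notmem rest _ pr.1 (by
        intro x hx heq
        exact hnd.1 (by rw [← heq]; exact List.mem_map_of_mem hx))]
      rw [getD_set]
      simp [hlt]
    | succ k =>
      simp only [List.length_cons] at hk
      simp only [List.getElem_cons_succ] at hlt ⊢
      simp only [List.foldl_cons]
      exact ih _ k (by omega) hnd.2 (by simpa using hlt)

-- A's grouping fold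
lemma foldA_eq : ∀ (ts : List String) (k : Nat) (o t d c : List Nat),
    (((List.range' k ts.length).zip ts).foldl
      (fun (s : List Nat × List Nat × List Nat × List Nat) it =>
        if it.2 = "time" then (s.1, s.2.1 ++ [it.1], s.2.2.1, s.2.2.2)
        else if it.2 = "date" then (s.1, s.2.1, s.2.2.1 ++ [it.1], s.2.2.2)
        else if it.2 = "choice" then (s.1, s.2.1, s.2.2.1, s.2.2.2 ++ [it.1])
        else (s.1 ++ [it.1], s.2.1, s.2.2.1, s.2.2.2)) (o, t, d, c))
    = (o ++ posFrom 0 k (ts.map prioB), t ++ posFrom 1 k (ts.map prioB),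
       d ++ posFrom 2 k (ts.map prioB), c ++ posFrom 3 k (ts.map prioB)) := by
  intro ts
  induction ts with
  | nil => intro k o t d c; simp [posFrom]
  | cons ty rest ih =>
    intro k o t d c
    rw [List.length_cons, List.range'_succ]
    simp only [List.zip_cons_cons, List.foldl_cons, List.map_cons]
    by_cases h1 : ty = "time"
    · simp only [h1, if_pos rfl]
      rw [ih]
      simp [posFrom, prioB, h1]
    · by_cases h2 : ty = "date"
      · simp only [h1, h2, if_neg, if_pos rfl, reduceIte]
        rw [ih]
        simp [posFrom, prioB, h1, h2]
      · by_cases h3 : ty = "choice"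
        · simp only [h1, h2, h3, reduceIte]
          rw [ih]
          simp [posFrom, prioB, h1, h2, h3]
        · simp only [h1, h2, h3, reduceIte]
          rw [ih]
          simp [posFrom, prioB, h1, h2, h3]

-- B's counting fold
lemma counts_fold : ∀ (p : List Nat) (c : List Nat) (v : Nat), (∀ x ∈ p, x < c.length) →
    ((p.foldl (fun c x => c.set x (c.getD x 0 + 1)) c).getD v 0) = c.getD v 0 + p.count v := by
  intro p
  induction p with
  | nil => intro c v _; simp
  | cons x xs ih =>
    intro c v h
    have hx : x < c.length := h x (by simp)
    simp only [List.foldl_cons]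
    rw [ih _ v (by intro y hy; rw [List.length_set]; exact h y (by simp [hy]))]
    rw [getD_set, List.count_cons]
    by_cases hxy : x = v
    · subst hxy; simp [hx]; omega
    · have : (x == v) = false := by simp [hxy]
      simp [hxy, this]

-- B's output-building fold, as a recursive function
def bRun (raw : List String) : List Nat → List Nat → List String
  | _, [] => []
  | nxt, x :: xs => raw.getD (nxt.getD x 0) "" :: bRun raw (nxt.set x (nxt.getD x 0 + 1)) xs

lemma bFold (raw : List String) : ∀ (p : List Nat) (nxt : List Nat) (out : List String),
    (p.foldl (fun (s : List Nat × List String) x =>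
      (s.1.set x (s.1.getD x 0 + 1), s.2 ++ [raw.getD (s.1.getD x 0) ""])) (nxt, out)).2
    = out ++ bRun raw nxt p := by
  intro p
  induction p with
  | nil => intro nxt out; simp [bRun]
  | cons x xs ih =>
    intro nxt out
    simp only [List.foldl_cons]
    rw [ih, bRun]
    simp

lemma bRun_length (raw : List String) : ∀ (p : List Nat) (nxt : List Nat),
    (bRun raw nxt p).length = p.length := by
  intro p
  induction p with
  | nil => intro nxt; simp [bRun]
  | cons x xs ih => intro nxt; simp [bRun, ih]

lemma bRun_getElem? (raw : List String) : ∀ (p : List Nat) (nxt : List Nat) (i : Nat),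
    i < p.length → (∀ x ∈ p, x < nxt.length) →
    (bRun raw nxt p)[i]? =
      some (raw.getD (nxt.getD (p.getD i 0) 0 + (p.take i).count (p.getD i 0)) "") := by
  intro p
  induction p with
  | nil => intro nxt i hi; simp at hi
  | cons x xs ih =>
    intro nxt i hi hall
    cases i with
    | zero => simp [bRun]
    | succ i =>
      simp only [List.length_cons] at hi
      have hi' : i < xs.length := by omega
      have hy : xs.getD i 0 = xs[i] := List.getD_eq_getElem xs 0 hi'
      have hymem : xs.getD i 0 ∈ xs := by rw [hy]; exact List.getElem_mem hi'
      have hylt : xs.getD i 0 < nxt.length := hall _ (List.mem_cons_of_mem x hymem)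
      rw [bRun, List.getElem?_cons_succ]
      rw [ih _ i hi' (by intro z hz; rw [List.length_set]; exact hall z (by simp [hz]))]
      have hgd : (x :: xs).getD (i + 1) 0 = xs.getD i 0 := rfl
      rw [hgd]
      rw [getD_set]
      by_cases hxy : x = xs.getD i 0
      · rw [if_pos ⟨hxy, hylt⟩, List.take_succ_cons, List.count_cons, hxy]
        have hb : (xs.getD i 0 == xs.getD i 0) = true := beq_self_eq_true _
        rw [hb]
        refine congrArg some (congrArg (fun m => raw.getD m "") ?_)
        rw [if_pos rfl]
        omega
      · rw [if_neg (fun hc => hxy hc.1), List.take_succ_cons, List.count_cons]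
        have hb : (x == xs.getD i 0) = false := beq_eq_false_iff_ne.mpr hxy
        rw [hb]
        simp

lemma count_take_lt : ∀ (p : List Nat) (i v : Nat), i < p.length → p.getD i 0 = v →
    (p.take i).count v + 1 ≤ p.count v := by
  intro p
  induction p with
  | nil => intro i v hi; simp at hi
  | cons x xs ih =>
    intro i v hi hv
    cases i with
    | zero =>
      simp at hv
      simp [hv, List.count_cons]
    | succ i =>
      simp at hi
      have := ih i v hi hv
      rw [List.take_succ_cons, List.count_cons, List.count_cons]
      by_cases hxy : x = v <;> simp [hxy] <;> omega

lemma nodup_posFrom (v : Nat) (p : List Nat) (k : Nat) : (posFrom v k p).Nodup :=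
  (posFrom_pairwise v p k).imp (fun h => Nat.ne_of_lt h)

lemma posFrom_disj (p : List Nat) (v w a : Nat) (hvw : v ≠ w)
    (ha : a ∈ posFrom v 0 p) (hb : a ∈ posFrom w 0 p) : False := by
  obtain ⟨-, hal, hav⟩ := posFrom_mem v p 0 a ha
  obtain ⟨-, -, haw⟩ := posFrom_mem w p 0 a hb
  simp only [Nat.sub_zero] at hal hav haw
  rw [List.getD_eq_getElem p (v + 1) hal] at hav
  rw [List.getD_eq_getElem p (w + 1) hal] at haw
  exact hvw (hav ▸ haw ▸ rfl)

theorem order_keys_spec : Claim_equal_order_keys := by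
  intro raw types _ hpre
  show order_keys raw types = order_keys_alt raw types
  have hpre' : types.length ≤ raw.length := hpre
  have hx4 : ∀ x ∈ types.map prioB, x < 4 := by
    intro x hx
    obtain ⟨t, -, rfl⟩ := List.mem_map.mp hx
    exact prioB_lt4 t
  set p := types.map prioB with hp
  have hplen : p.length = types.length := by simp [hp]
  have hc : ∀ v, (p.foldl (fun c x => c.set x (c.getD x 0 + 1)) [0, 0, 0, 0]).getD v 0
      = p.count v := by
    intro v
    rw [counts_fold p [0, 0, 0, 0] v (fun x hx => by simpa using hx4 x hx)]
    have hz : ([0, 0, 0, 0] : List Nat).getD v 0 = 0 := by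
      match v with
      | 0 => rfl
      | 1 => rfl
      | 2 => rfl
      | 3 => rfl
      | (n + 4) =>
        rw [List.getD_eq_getElem?_getD, List.getElem?_eq_none_iff.mpr (by simp)]
        rfl
    rw [hz, Nat.zero_add]
  have hB : order_keys_alt raw types =
      bRun raw [0, p.count 0, p.count 0 + p.count 1, p.count 0 + p.count 1 + p.count 2] p := by
    simp only [order_keys_alt, ← hp]
    rw [bFold]
    simp only [List.nil_append, List.getD_cons_zero, List.getD_cons_succ, hc]
  have hA : order_keys raw types =
      (((posFrom 0 0 p ++ posFrom 1 0 p ++ posFrom 2 0 p ++ posFrom 3 0 p).zip raw).foldl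
        (fun ks iv => ks.set iv.1 iv.2) (List.replicate types.length "")) := by
    simp only [order_keys, List.range_eq_range', foldA_eq, List.nil_append, ← hp]
  rw [hA, hB]
  have hl0 : (posFrom 0 0 p).length = p.count 0 := posFrom_length 0 p 0
  have hl1 : (posFrom 1 0 p).length = p.count 1 := posFrom_length 1 p 0
  have hl2 : (posFrom 2 0 p).length = p.count 2 := posFrom_length 2 p 0
  have hl3 : (posFrom 3 0 p).length = p.count 3 := posFrom_length 3 p 0
  have hsum : p.count 0 + p.count 1 + p.count 2 + p.count 3 = p.length := count4 p hx4
  set inds := posFrom 0 0 p ++ posFrom 1 0 p ++ posFrom 2 0 p ++ posFrom 3 0 p with hIeq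
  have hil : inds.length = types.length := by
    rw [hIeq]
    simp only [List.length_append]
    omega
  have hziplen : (inds.zip raw).length = types.length := by
    rw [List.length_zip, hil]
    omega
  have hnd : inds.Nodup := by
    rw [hIeq]
    refine List.nodup_append.mpr ⟨List.nodup_append.mpr ⟨List.nodup_append.mpr
      ⟨nodup_posFrom 0 p 0, nodup_posFrom 1 p 0, ?_⟩, nodup_posFrom 2 p 0, ?_⟩,
      nodup_posFrom 3 p 0, ?_⟩
    · intro a ha b hb heq
      exact posFrom_disj p 0 1 b (by omega) (heq ▸ ha) hb
    · intro a ha b hb heq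
      rcases List.mem_append.mp ha with h | h
      · exact posFrom_disj p 0 2 b (by omega) (heq ▸ h) hb
      · exact posFrom_disj p 1 2 b (by omega) (heq ▸ h) hb
    · intro a ha b hb heq
      rcases List.mem_append.mp ha with h | h
      · rcases List.mem_append.mp h with h2 | h2
        · exact posFrom_disj p 0 3 b (by omega) (heq ▸ h2) hb
        · exact posFrom_disj p 1 3 b (by omega) (heq ▸ h2) hb
      · exact posFrom_disj p 2 3 b (by omega) (heq ▸ h) hb
  apply List.ext_getElem
  · rw [scatter_length, bRun_length, List.length_replicate, hplen]
  intro i hi1 hi2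
  have hin : i < types.length := by
    rw [scatter_length, List.length_replicate] at hi1
    exact hi1
  have hip : i < p.length := by omega
  obtain ⟨v, hv⟩ : ∃ v, p.getD i 0 = v := ⟨_, rfl⟩
  have hvmem : v ∈ p := by
    rw [← hv, List.getD_eq_getElem p 0 hip]
    exact List.getElem_mem hip
  have hv4 : v < 4 := hx4 v hvmem
  obtain ⟨c, hcd⟩ : ∃ c, (p.take i).count v = c := ⟨_, rfl⟩
  have hct : c + 1 ≤ p.count v := hcd ▸ count_take_lt p i v hip hv
  have hvsplit : v = 0 ∨ v = 1 ∨ v = 2 ∨ v = 3 := by omega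
  have hkey : inds[(([0, p.count 0, p.count 0 + p.count 1,
        p.count 0 + p.count 1 + p.count 2] : List Nat).getD v 0 + c)]? = some i ∧
      (([0, p.count 0, p.count 0 + p.count 1,
        p.count 0 + p.count 1 + p.count 2] : List Nat).getD v 0 + c) < types.length := by
    have hpf0 := posFrom_getElem? 0 p 0 i hip
    have hpf1 := posFrom_getElem? 1 p 0 i hip
    have hpf2 := posFrom_getElem? 2 p 0 i hip
    have hpf3 := posFrom_getElem? 3 p 0 i hip
    rcases hvsplit with rfl | rfl | rfl | rfl
    · have hfind := hpf0 hv
      rw [hcd, Nat.zero_add] at hfind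
      simp only [List.getD_cons_zero, Nat.zero_add]
      constructor
      · rw [hIeq,
          List.getElem?_append_left (by simp only [List.length_append]; omega),
          List.getElem?_append_left (by simp only [List.length_append]; omega),
          List.getElem?_append_left (by omega)]
        exact hfind
      · omega
    · have hfind := hpf1 hv
      rw [hcd, Nat.zero_add] at hfind
      simp only [List.getD_cons_succ, List.getD_cons_zero]
      constructor
      · rw [hIeq,
          List.getElem?_append_left (by simp only [List.length_append]; omega),
          List.getElem?_append_left (by simp only [List.length_append]; omega),
          List.getElem?_append_right (by omega)]
        rw [show p.count 0 + c - (posFrom 0 0 p).length = c by omega]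
        exact hfind
      · omega
    · have hfind := hpf2 hv
      rw [hcd, Nat.zero_add] at hfind
      simp only [List.getD_cons_succ, List.getD_cons_zero]
      constructor
      · rw [hIeq,
          List.getElem?_append_left (by simp only [List.length_append]; omega),
          List.getElem?_append_right (by simp only [List.length_append]; omega)]
        rw [show p.count 0 + p.count 1 + c - (posFrom 0 0 p ++ posFrom 1 0 p).length = c by
          simp only [List.length_append]; omega]
        exact hfind
      · omega
    · have hfind := hpf3 hv
      rw [hcd, Nat.zero_add] at hfind
      simp only [List.getD_cons_succ, List.getD_cons_zero]
      constructor
      · rw [hIeq,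
          List.getElem?_append_right (by simp only [List.length_append]; omega)]
        rw [show p.count 0 + p.count 1 + p.count 2 + c -
            (posFrom 0 0 p ++ posFrom 1 0 p ++ posFrom 2 0 p).length = c by
          simp only [List.length_append]; omega]
        exact hfind
      · omega
  obtain ⟨hfind, hrlt⟩ := hkey
  obtain ⟨r, hr⟩ : ∃ r, (([0, p.count 0, p.count 0 + p.count 1,
      p.count 0 + p.count 1 + p.count 2] : List Nat).getD v 0 + c) = r := ⟨_, rfl⟩
  rw [hr] at hfind hrlt
  have hr_raw : r < raw.length := by omega
  have hr_zip : r < (inds.zip raw).length := by omega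
  have hindr : inds[r]'(by omega) = i := by
    have := hfind
    rw [List.getElem?_eq_getElem (by omega : r < inds.length)] at this
    exact Option.some.inj this
  have hpair : (inds.zip raw)[r]'hr_zip = (i, raw[r]'hr_raw) := by
    rw [List.getElem_zip, hindr]
  have hmapfst : ((inds.zip raw).map Prod.fst).Nodup := by
    rw [List.map_fst_zip (by omega : inds.length ≤ raw.length)]
    exact hnd
  have hsc := scatter_getD (inds.zip raw) (List.replicate types.length "") r hr_zip hmapfst
    (by rw [hpair]; simpa using hin)
  rw [hpair] at hsc
  simp only at hsc
  have hL : ((inds.zip raw).foldl (fun ks iv => ks.set iv.1 iv.2)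
      (List.replicate types.length ""))[i]'hi1 = raw[r]'hr_raw := by
    rw [← hsc, List.getD_eq_getElem _ "" hi1]
  have hR : (bRun raw [0, p.count 0, p.count 0 + p.count 1,
      p.count 0 + p.count 1 + p.count 2] p)[i]'hi2 = raw.getD r "" := by
    have hbr := bRun_getElem? raw p
      [0, p.count 0, p.count 0 + p.count 1, p.count 0 + p.count 1 + p.count 2] i hip
      (fun x hx => by simpa using hx4 x hx)
    rw [hv, hcd, hr] at hbr
    rw [List.getElem?_eq_getElem hi2] at hbr
    exact Option.some.inj hbr
  rw [hL, hR, List.getD_eq_getElem raw "" hr_raw]
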